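-- pv_equiv track=rewrite | github.com/Ryunos96/Programmers | 프로그래머스/0/181874. A 강조하기/A 강조하기.py | solution
-- ===== SOURCE A (Python) =====
-- def solution(myString):
--     string = list(myString)
--     answer = ''
--     for i in range(len(string)):
--         if string[i] == 'a' or string[i] == 'A':
--             answer += string[i].upper()
--         else:
--             answer += string[i].lower()
--     return answer
-- ===== SOURCE B (Python) =====
-- def solution(myString):
--     return myString.lower().replace('a', 'A')
-- ===== Notes on version B (the rewrite author's own statement) =====
-- stated objective: faster
-- what changed: Replaces the explicit index loop with a per-character branch and quadratic string += by two unconditional whole-string passes: lowercase everything, then substitute the uppercase form of the target letter.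
import Mathlib
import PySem

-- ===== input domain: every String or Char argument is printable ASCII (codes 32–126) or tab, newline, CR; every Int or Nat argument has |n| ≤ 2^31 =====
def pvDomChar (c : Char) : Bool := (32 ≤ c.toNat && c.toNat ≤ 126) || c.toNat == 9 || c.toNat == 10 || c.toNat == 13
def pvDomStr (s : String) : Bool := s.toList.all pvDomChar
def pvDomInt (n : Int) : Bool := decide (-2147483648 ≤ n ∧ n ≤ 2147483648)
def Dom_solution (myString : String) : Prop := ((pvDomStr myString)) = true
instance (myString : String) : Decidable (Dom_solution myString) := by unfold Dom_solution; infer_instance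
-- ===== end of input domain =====

-- B is simpler: A's index loop with a per-character branch becomes two whole-string passes, lower() then replace('a','A').

-- ===== PORT A =====
-- index loop over range(len(string)), building answer by += with .upper()/.lower() on the one-char string
def solution (myString : String) : String :=
  let string := myString.toList
  let answer : List Char :=
    (PySem.List.pyRange 0 (string.length : Int)).foldl
      (fun answer i =>
        if PySem.List.pyGetD string i ' ' = 'a' ∨ PySem.List.pyGetD string i ' ' = 'A' then
          answer ++ PySem.Chars.upper [PySem.List.pyGetD string i ' ']
        else
          answer ++ PySem.Chars.lower [PySem.List.pyGetD string i ' '])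
      []
  String.ofList answer

-- ===== PORT B =====
def solution_alt (myString : String) : String :=
  PySem.Str.replace (PySem.Str.lower myString) "a" "A"

-- ===== PRECONDITION & SPEC =====
def Spec_solution (myString : String) (out : String) : Prop := out = solution_alt myString
instance (myString : String) (out : String) : Decidable (Spec_solution myString out) := by unfold Spec_solution; infer_instance

-- ===== CLAIM (what is proved, stated in full; the proofs are below) =====
def Claim_equal_solution : Prop := ∀ (myString : String), Dom_solution myString → Spec_solution myString (solution myString)

-- ===== LEMMAS AND PROOFS =====

-- replace.go with the single-char pattern 'a' → 'A' is a map, given enough fuel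
theorem replace_go_single (fuel : Nat) : ∀ (l acc : List Char), l.length ≤ fuel →
    PySem.Chars.replace.go ['a'] ['A'] fuel l acc
      = acc.reverse ++ l.map (fun c => if c = 'a' then 'A' else c) := by
  induction fuel with
  | zero =>
    intro l acc h
    have : l = [] := List.length_eq_zero_iff.mp (Nat.le_zero.mp h)
    subst this
    simp [PySem.Chars.replace.go]
  | succ n ih =>
    intro l acc h
    cases l with
    | nil => simp [PySem.Chars.replace.go]
    | cons c t =>
      by_cases hc : c = 'a'
      · subst hc
        have hpre : (['a'] : List Char).isPrefixOf ('a' :: t) = true := by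
          simp [List.isPrefixOf]
        rw [PySem.Chars.replace.go]
        simp only [hpre, if_true, List.length_cons, List.length_nil, List.drop_succ_cons,
          List.drop_zero, List.reverse_cons, List.reverse_nil, List.nil_append]
        rw [ih t (['A'] ++ acc) (by simp only [List.length_cons] at h; omega)]
        simp
      · have hpre : (['a'] : List Char).isPrefixOf (c :: t) = false := by
          simp [List.isPrefixOf]
          exact fun h => hc h.symm
        rw [PySem.Chars.replace.go]
        simp only [hpre, Bool.false_eq_true, if_false]
        rw [ih t (c :: acc) (by simp only [List.length_cons] at h; omega)]
        simp [hc]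

theorem replace_single (cs : List Char) :
    PySem.Chars.replace cs ['a'] ['A'] = cs.map (fun c => if c = 'a' then 'A' else c) := by
  rw [PySem.Chars.replace]
  simp only [List.isEmpty_cons, Bool.false_eq_true, if_false]
  simpa using replace_go_single cs.length cs [] (le_refl _)

-- per-character agreement of the two transformations
theorem char_step (c : Char) :
    (if PySem.Chars.lowerChar c = 'a' then 'A' else PySem.Chars.lowerChar c)
      = (if c = 'a' ∨ c = 'A' then PySem.Chars.upperChar c else PySem.Chars.lowerChar c) := by
  by_cases ha : c = 'a'
  · subst ha; decide
  by_cases hA : c = 'A'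
  · subst hA; decide
  simp [ha, hA]
  intro h
  exfalso
  unfold PySem.Chars.lowerChar PySem.Chars.isupper at h
  split at h
  · rename_i hu
    simp only [Bool.and_eq_true, decide_eq_true_eq, Char.le_def] at hu
    have hb1 : 65 ≤ c.toNat := by exact_mod_cast UInt32.le_iff_toNat_le.mp hu.1
    have hb2 : c.toNat ≤ 90 := by exact_mod_cast UInt32.le_iff_toNat_le.mp hu.2
    have hne : c.toNat ≠ 65 := by
      intro he
      apply hA
      apply Char.ext
      apply UInt32.toNat_inj.mp
      exact he.trans (by decide)
    have hvalid : (c.toNat + 32).isValidChar := by left; omega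
    have h97 : (Char.ofNat (c.toNat + 32)).toNat = c.toNat + 32 := by
      rw [Char.toNat_ofNat]; simp [hvalid]
    have hc := congrArg Char.toNat h
    rw [h97] at hc
    have : ('a').toNat = 97 := by decide
    omega
  · exact ha h

-- A's accumulating loop is append-of-map
theorem foldl_step (cs : List Char) : ∀ (acc : List Char),
    cs.foldl
      (fun answer c =>
        if c = 'a' ∨ c = 'A' then answer ++ PySem.Chars.upper [c]
        else answer ++ PySem.Chars.lower [c]) acc
      = acc ++ cs.map (fun c => if c = 'a' ∨ c = 'A' then PySem.Chars.upperChar c else PySem.Chars.lowerChar c) := by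
  induction cs with
  | nil => intro acc; simp
  | cons c t ih =>
    intro acc
    by_cases hc : c = 'a' ∨ c = 'A'
    · simp only [List.foldl_cons, if_pos hc]
      rw [ih]
      simp [hc, PySem.Chars.upper]
    · simp only [List.foldl_cons, if_neg hc]
      rw [ih]
      simp [hc, PySem.Chars.lower]

-- ===== VERDICT (by name: the statement is the Claim_ definition above) =====
theorem solution_spec : Claim_equal_solution := by
  intro myString _
  unfold Spec_solution solution solution_alt
  apply String.toList_inj.mp
  rw [String.toList_ofList]
  rw [PySem.List.foldl_pyRange_zero_pyGetD' myString.toList ' '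
    (fun answer c =>
      if c = 'a' ∨ c = 'A' then answer ++ PySem.Chars.upper [c]
      else answer ++ PySem.Chars.lower [c]) []]
  rw [foldl_step]
  simp only [List.nil_append, PySem.Str.toList_replace, PySem.Str.toList_lower,
    show ("a" : String).toList = ['a'] from rfl, show ("A" : String).toList = ['A'] from rfl]
  rw [replace_single]
  simp only [PySem.Chars.lower, List.map_map]
  apply List.map_congr_left
  intro c _
  exact (char_step c).symm
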